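-- pv_equiv track=rewrite | github.com/YonasOmega/TheLegendOfDub | Model/DungeonGenerator.py | spaced_entrance_and_exit
-- ===== SOURCE A (Python) =====
-- def spaced_entrance_and_exit(tuple1: tuple, tuple2: tuple):
--     """
--     Check if the entrance and exit points are not immediately adjacent, including diagonally.
--
--     :param tuple1: The coordinates of the entrance.
--     :param tuple2: The coordinates of the exit.
--     :return: True if entrance and exit are not adjacent, False otherwise.
--     """
--     # Unpack tuples into coordinates
--     x1, y1 = tuple1
--     x2, y2 = tuple2
--
--     # Check if the exit is not in any of the immediately surrounding positions of the entrance
--     # This includes diagonally adjacent positions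
--     for dx in [-1, 0, 1]:
--         for dy in [-1, 0, 1]:
--             if (x1 + dx, y1 + dy) == tuple2:
--                 return False  # Exit is in one of the surrounding positions
--
--     return True  # Exit is not in any of the surrounding positions
-- ===== SOURCE B (Python) =====
-- def spaced_entrance_and_exit(tuple1: tuple, tuple2: tuple):
--     x1, y1 = tuple1
--     x2, y2 = tuple2
--     return not ((x2 - x1) in (-1, 0, 1) and (y2 - y1) in (-1, 0, 1))
-- ===== Notes on version B (the rewrite author's own statement) =====
-- stated objective: simpler
-- what changed: Replaces the 3x3 nested loop over neighbor offsets with a single closed-form membership test on the two coordinate differences.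
import Mathlib
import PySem

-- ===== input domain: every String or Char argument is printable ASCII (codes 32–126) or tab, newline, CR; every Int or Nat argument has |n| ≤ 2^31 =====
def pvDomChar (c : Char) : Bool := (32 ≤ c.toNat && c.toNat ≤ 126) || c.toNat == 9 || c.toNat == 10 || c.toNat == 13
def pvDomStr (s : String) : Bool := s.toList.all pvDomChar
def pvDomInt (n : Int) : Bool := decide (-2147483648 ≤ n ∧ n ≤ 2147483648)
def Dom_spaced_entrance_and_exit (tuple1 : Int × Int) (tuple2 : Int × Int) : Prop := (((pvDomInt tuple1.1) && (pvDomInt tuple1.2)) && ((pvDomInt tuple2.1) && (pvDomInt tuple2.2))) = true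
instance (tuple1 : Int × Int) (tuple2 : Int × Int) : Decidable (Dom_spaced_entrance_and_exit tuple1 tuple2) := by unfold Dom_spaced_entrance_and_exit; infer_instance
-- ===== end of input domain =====

-- B replaces A's 3x3 loop over neighbor offsets with one closed-form membership test on the coordinate differences (simpler).

-- ===== PORT A =====
-- A loops dx over [-1,0,1], dy over [-1,0,1], returning False on the first (x1+dx, y1+dy) == tuple2.
def spaced_entrance_and_exit (tuple1 : Int × Int) (tuple2 : Int × Int) : Bool :=
  let x1 := tuple1.1; let y1 := tuple1.2
  ([-1, 0, 1] : List Int).all (fun dx =>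
    ([-1, 0, 1] : List Int).all (fun dy =>
      !((x1 + dx, y1 + dy) == tuple2)))

-- ===== PORT B =====
def spaced_entrance_and_exit_alt (tuple1 : Int × Int) (tuple2 : Int × Int) : Bool :=
  let x1 := tuple1.1; let y1 := tuple1.2
  let x2 := tuple2.1; let y2 := tuple2.2
  !(((x2 - x1) ∈ ([-1, 0, 1] : List Int)) && ((y2 - y1) ∈ ([-1, 0, 1] : List Int)))

-- ===== PRECONDITION & SPEC =====
def Spec_spaced_entrance_and_exit (tuple1 : Int × Int) (tuple2 : Int × Int) (out : Bool) : Prop := out = spaced_entrance_and_exit_alt tuple1 tuple2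
instance (tuple1 : Int × Int) (tuple2 : Int × Int) (out : Bool) : Decidable (Spec_spaced_entrance_and_exit tuple1 tuple2 out) := by unfold Spec_spaced_entrance_and_exit; infer_instance

-- ===== CLAIM (what is proved, stated in full; the proofs are below) =====
def Claim_equal_spaced_entrance_and_exit : Prop := ∀ (tuple1 : Int × Int) (tuple2 : Int × Int), Dom_spaced_entrance_and_exit tuple1 tuple2 → Spec_spaced_entrance_and_exit tuple1 tuple2 (spaced_entrance_and_exit tuple1 tuple2)

-- ===== LEMMAS AND PROOFS =====

-- ===== VERDICT (by name: the statement is the Claim_ definition above) =====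
theorem spaced_entrance_and_exit_spec : Claim_equal_spaced_entrance_and_exit := by
  intro ⟨x1, y1⟩ ⟨x2, y2⟩ _
  unfold Spec_spaced_entrance_and_exit spaced_entrance_and_exit spaced_entrance_and_exit_alt
  simp only [List.all_cons, List.all_nil, Bool.and_true, List.mem_cons, List.not_mem_nil,
    or_false]
  rw [Bool.eq_iff_iff]
  simp [Prod.ext_iff]
  omega
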